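-- pv_equiv track=rewrite | github.com/MrBrantCode/unitest_baseline | mut_generate/mist_train_cf/cf_55894/solution.py | check_arrays
-- ===== SOURCE A (Python) =====
-- from concurrent.futures import ThreadPoolExecutor
--
-- def check_arrays(arrays):
--     def progression_difference(array):
--         if len(array) < 2:
--             return None
--         diff = array[1] - array[0]
--         for i in range(2, len(array)):
--             if array[i] - array[i-1] != diff:
--                 return None
--         return diff
--
--     with ThreadPoolExecutor(max_workers=len(arrays)) as executor:
--         results = executor.map(progression_difference, arrays)
--     return {i: res for i, res in enumerate(results) if res is not None}
-- ===== SOURCE B (Python) =====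
-- def check_arrays(arrays):
--     result = {}
--     for i, array in enumerate(arrays):
--         diffs = [b - a for a, b in zip(array, array[1:])]
--         if len(set(diffs)) == 1:
--             result[i] = diffs[0]
--     return result
-- ===== Notes on version B (the rewrite author's own statement) =====
-- stated objective: simpler
-- what changed: Drops the ThreadPoolExecutor and the per-array early-exit index scan; instead builds the list of consecutive differences via zip and admits an array iff the set of its differences is a singleton, assembling the dict in one plain loop.
import Mathlib
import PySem

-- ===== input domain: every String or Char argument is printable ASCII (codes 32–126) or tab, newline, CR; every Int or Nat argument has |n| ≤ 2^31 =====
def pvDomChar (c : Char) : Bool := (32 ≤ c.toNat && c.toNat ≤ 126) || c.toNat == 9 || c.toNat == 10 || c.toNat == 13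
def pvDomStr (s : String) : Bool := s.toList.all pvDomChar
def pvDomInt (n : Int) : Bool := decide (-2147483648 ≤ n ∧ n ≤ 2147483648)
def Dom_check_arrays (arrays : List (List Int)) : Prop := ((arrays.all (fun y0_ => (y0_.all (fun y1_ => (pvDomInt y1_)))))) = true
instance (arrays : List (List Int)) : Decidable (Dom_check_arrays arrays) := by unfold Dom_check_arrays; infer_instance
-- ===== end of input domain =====

-- B drops the thread pool and the early-exit index scan: it builds each array's list of
-- consecutive differences and admits the array iff that list's set is a singleton (simpler).

-- ===== PORT A =====
-- the 'for i in range(2, len(array))' loop with its early 'return None'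
def pvLoopA (array : List Int) (diff : Int) (i : Nat) : Option Int :=
  if i < array.length then
    if PySem.List.pyGetD array (i : Int) 0 - PySem.List.pyGetD array ((i : Int) - 1) 0 ≠ diff then
      none
    else pvLoopA array diff (i + 1)
  else some diff
termination_by array.length - i

def pvProgressionDifference (array : List Int) : Option Int :=
  if array.length < 2 then none
  else
    let diff := PySem.List.pyGetD array 1 0 - PySem.List.pyGetD array 0 0
    pvLoopA array diff 2

def check_arrays (arrays : List (List Int)) : List (Int × Int) :=
  let results := arrays.map pvProgressionDifference
  ((PySem.List.enumerate results 0).foldl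
    (fun d p => match p.2 with
      | some r => PySem.Dict.insert d p.1 r
      | none => d)
    PySem.Dict.empty).items

-- ===== PORT B =====
def check_arrays_alt (arrays : List (List Int)) : List (Int × Int) :=
  ((PySem.List.enumerate arrays 0).foldl
    (fun result p =>
      let diffs := (p.2.zip (PySem.List.slice p.2 (some 1) none)).map (fun ab => ab.2 - ab.1)
      if (PySem.Set.ofList diffs).length == 1 then
        PySem.Dict.insert result p.1 (PySem.List.pyGetD diffs 0 0)
      else result)
    PySem.Dict.empty).items

-- ===== PRECONDITION & SPEC =====
-- Pre_ excludes only the empty input list, on which A raises ValueError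
-- (ThreadPoolExecutor refuses max_workers=0); A is total elsewhere.
def Pre_check_arrays (arrays : List (List Int)) : Prop := arrays ≠ []
instance (arrays : List (List Int)) : Decidable (Pre_check_arrays arrays) := by unfold Pre_check_arrays; infer_instance
def pvWitness_check_arrays : List (List Int) := [[1, 3, 5], [1, 2, 4], [7], []]

def Spec_check_arrays (arrays : List (List Int)) (out : List (Int × Int)) : Prop := out = check_arrays_alt arrays
instance (arrays : List (List Int)) (out : List (Int × Int)) : Decidable (Spec_check_arrays arrays out) := by unfold Spec_check_arrays; infer_instance

-- ===== CLAIM (what is proved, stated in full; the proofs are below) =====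
def Claim_equal_check_arrays : Prop := ∀ (arrays : List (List Int)), Dom_check_arrays arrays → Pre_check_arrays arrays → Spec_check_arrays arrays (check_arrays arrays)

-- ===== LEMMAS AND PROOFS =====

-- loop characterisation: pvLoopA checks that every remaining consecutive difference equals diff
lemma pvLoopA_eq (a : List Int) (d : Int) (i : Nat) (hi : 1 ≤ i) :
    pvLoopA a d i =
      if (((a.drop (i - 1)).zip (a.drop i)).map (fun ab => ab.2 - ab.1)).all (· == d)
      then some d else none := by
  rw [pvLoopA]
  by_cases h : i < a.length
  · have h1 : i - 1 < a.length := by omega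
    have hdrop1 : a.drop (i - 1) = a[i - 1] :: a.drop i := by
      have := List.drop_eq_getElem_cons h1
      rwa [Nat.sub_add_cancel hi] at this
    have hdrop2 : a.drop i = a[i] :: a.drop (i + 1) := List.drop_eq_getElem_cons h
    have hg1 : PySem.List.pyGetD a (i : Int) 0 = a[i] := by
      rw [PySem.List.pyGetD_natCast]
      simp [h]
    have hg2 : PySem.List.pyGetD a ((i : Int) - 1) 0 = a[i - 1] := by
      have hcast : ((i : Int) - 1) = ((i - 1 : Nat) : Int) := by omega
      rw [hcast, PySem.List.pyGetD_natCast]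
      simp [h1]
    rw [if_pos h, hg1, hg2]
    have hrec := pvLoopA_eq a d (i + 1) (by omega)
    have hstep : (i + 1) - 1 = i := by omega
    rw [hstep] at hrec
    by_cases hne : a[i] - a[i - 1] ≠ d
    · rw [if_pos hne, hdrop1]
      conv_rhs => rw [hdrop2]
      simp only [List.zip_cons_cons, List.map_cons, List.all_cons]
      rw [if_neg]
      simp only [Bool.and_eq_true, beq_iff_eq]
      rintro ⟨hd, -⟩
      exact hne hd
    · push_neg at hne
      rw [if_neg (by simpa using hne), hrec, hdrop1]
      conv_rhs => rw [hdrop2]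
      simp only [List.zip_cons_cons, List.map_cons, List.all_cons, hne, beq_self_eq_true,
        Bool.true_and]
      rw [← hdrop2]
  · rw [if_neg h]
    have hnil : a.drop i = [] := List.drop_eq_nil_of_le (by omega)
    simp [hnil]
termination_by a.length - i

-- a Python set of a nonempty list is a singleton iff every element equals the head
lemma pvFoldl_add_const (d : Int) : ∀ (s : List Int), (∀ x ∈ s, x = d) →
    List.foldl PySem.Set.add [d] s = [d]
  | [], _ => rfl
  | y :: ys, hs => by
      have hy : y = d := hs y (by simp)
      subst hy
      have hadd : PySem.Set.add [y] y = [y] := by simp [PySem.Set.add, PySem.Set.contains]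
      simp only [List.foldl_cons, hadd]
      exact pvFoldl_add_const y ys (fun x hx => hs x (by simp [hx]))

lemma pvSet_singleton_iff (d : Int) (t : List Int) :
    (PySem.Set.ofList (d :: t)).length = 1 ↔ t.all (· == d) = true := by
  constructor
  · intro h
    rcases he : PySem.Set.ofList (d :: t) with _ | ⟨e, rest⟩
    · rw [he] at h; simp at h
    · rw [he] at h
      have hrest : rest = [] := by simpa using h
      subst hrest
      have hd : d ∈ PySem.Set.ofList (d :: t) := by rw [PySem.Set.mem_ofList]; simp
      rw [he] at hd
      simp only [List.mem_singleton] at hd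
      subst hd
      rw [List.all_eq_true]
      intro x hx
      have hm : x ∈ PySem.Set.ofList (d :: t) := by
        rw [PySem.Set.mem_ofList]; simp [hx]
      rw [he] at hm
      simpa using hm
  · intro h
    have hall : ∀ x ∈ t, x = d := by
      rw [List.all_eq_true] at h
      intro x hx
      exact eq_of_beq (h x hx)
    have hofl : PySem.Set.ofList (d :: t) = [d] := by
      rw [PySem.Set.ofList_eq_foldl]
      simp only [List.foldl_cons]
      have hadd0 : PySem.Set.add [] d = [d] := by simp [PySem.Set.add, PySem.Set.contains]
      rw [hadd0]
      exact pvFoldl_add_const d t hall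
    rw [hofl]
    rfl

-- B's per-array diff list
def pvDiffsB (a : List Int) : List Int :=
  (a.zip (PySem.List.slice a (some 1) none)).map (fun ab => ab.2 - ab.1)

-- per-array core: A's scan agrees with B's singleton-set test
lemma pvProg_eq (a : List Int) :
    pvProgressionDifference a =
      (if (PySem.Set.ofList (pvDiffsB a)).length == 1
       then some (PySem.List.pyGetD (pvDiffsB a) 0 0) else none) := by
  match a with
  | [] => rfl
  | [x] =>
    simp [pvProgressionDifference, pvDiffsB, PySem.List.slice_from_one, PySem.Set.ofList]
  | x :: y :: t =>
    have hlen : ¬ ((x :: y :: t).length < 2) := by simp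
    have hdiffs : pvDiffsB (x :: y :: t) =
        (y - x) :: ((y :: t).zip t).map (fun ab => ab.2 - ab.1) := by
      simp [pvDiffsB, PySem.List.slice_from_one]
    have hg0 : PySem.List.pyGetD (x :: y :: t) (0 : Int) 0 = x := by
      have := PySem.List.pyGetD_natCast (x :: y :: t) 0 0
      simpa using this
    have hg1 : PySem.List.pyGetD (x :: y :: t) (1 : Int) 0 = y := by
      have := PySem.List.pyGetD_natCast (x :: y :: t) 1 0
      simpa using this
    have hloop := pvLoopA_eq (x :: y :: t) (y - x) 2 (by omega)
    have hdrop : (x :: y :: t).drop 1 = y :: t := rfl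
    have hdrop2 : (x :: y :: t).drop 2 = t := rfl
    rw [pvProgressionDifference, if_neg hlen]
    simp only [hg0, hg1]
    rw [hloop, hdiffs]
    have hget : PySem.List.pyGetD
        ((y - x) :: ((y :: t).zip t).map (fun ab => ab.2 - ab.1)) (0 : Int) 0 = y - x := by
      have := PySem.List.pyGetD_natCast
        ((y - x) :: ((y :: t).zip t).map (fun ab => ab.2 - ab.1)) 0 0
      simpa using this
    rw [hget]
    by_cases hc : (((y :: t).zip t).map (fun ab => ab.2 - ab.1)).all (· == (y - x)) = true
    · have h1 : (PySem.Set.ofList ((y - x) :: ((y :: t).zip t).map (fun ab => ab.2 - ab.1))).length = 1 :=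
        (pvSet_singleton_iff _ _).mpr hc
      rw [if_pos (by simpa [hdrop, hdrop2] using hc), if_pos (by simpa using h1)]
    · have h1 : ¬ (PySem.Set.ofList ((y - x) :: ((y :: t).zip t).map (fun ab => ab.2 - ab.1))).length = 1 :=
        fun hh => hc ((pvSet_singleton_iff _ _).mp hh)
      rw [if_neg (by simpa [hdrop, hdrop2] using hc), if_neg (by simpa using h1)]

-- enumerate over a mapped list
lemma pvEnumerate_map (f : List Int → Option Int) (xs : List (List Int)) (s : Int) :
    PySem.List.enumerate (xs.map f) s
      = (PySem.List.enumerate xs s).map (fun p => (p.1, f p.2)) := by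
  induction xs generalizing s with
  | nil => simp [PySem.List.enumerate_nil]
  | cons x xs ih => simp [PySem.List.enumerate_cons, ih]

theorem check_arrays_spec : Claim_equal_check_arrays := by
  intro arrays _ _
  unfold Spec_check_arrays check_arrays check_arrays_alt
  simp only [pvEnumerate_map, List.foldl_map]
  congr 1
  apply List.foldl_ext
  intro dct p _
  rw [pvProg_eq]
  by_cases hc : (PySem.Set.ofList (pvDiffsB p.2)).length == 1
  · rw [if_pos hc]
    simp only [pvDiffsB] at hc ⊢
    rw [if_pos hc]
  · rw [if_neg hc]
    simp only [pvDiffsB] at hc ⊢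
    rw [if_neg hc]
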